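-- pv_equiv track=rewrite | github.com/ARYANJATHAR/Ai_Career_Advisor | app.py | format_roles
-- ===== SOURCE A (Python) =====
-- def format_roles(content):
--     """Format roles as cards"""
--     formatted_content = []
--     current_role = []
--     in_role = False
--
--     for line in content.split('\n'):
--         if line.strip().startswith('1.') or line.strip().startswith('2.') or line.strip().startswith('3.'):
--             if in_role:
--                 formatted_content.append(format_role_card(current_role))
--             in_role = True
--             current_role = [line]
--         elif in_role and line.strip():
--             current_role.append(line)
--
--     if current_role:
--         formatted_content.append(format_role_card(current_role))
--
--     return '\n'.join(formatted_content)
--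
-- def format_role_card(role_lines):
--     """Helper function to format role card"""
--     role_title = role_lines[0].strip()
--     # Extract role name and match score
--     role_name = ""
--     match_score = ""
--     if "**" in role_title:
--         parts = role_title.split("**")
--         if len(parts) > 1:
--             role_name = parts[1].strip()
--             if "(Match Score:" in role_title:
--                 match_parts = role_title.split("(Match Score:")
--                 if len(match_parts) > 1:
--                     match_score = match_parts[1].split(")")[0].strip()
--
--     card_html = f'''
--     <div class="role-card">
--         <div class="role-title">{role_name} (Match Score: {match_score})</div>
--     '''
--
--     for line in role_lines[1:]:
--         line = line.strip()
--         if line.startswith('-'):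
--             detail = line[1:].strip()
--             if "Salary Range:" in detail:
--                 card_html += f'<div class="role-detail"><strong>Salary Range:</strong> {detail.split("Salary Range:")[1].strip()}</div>'
--             elif "Key Requirements:" in detail:
--                 card_html += f'<div class="role-detail"><strong>Key Requirements:</strong> {detail.split("Key Requirements:")[1].strip()}</div>'
--             elif "Why It Fits:" in detail:
--                 card_html += f'<div class="role-detail"><strong>Why It Fits:</strong> {detail.split("Why It Fits:")[1].strip()}</div>'
--             else:
--                 card_html += f'<div class="role-detail">{detail}</div>'
--
--     card_html += '</div>'
--     return card_html
-- ===== SOURCE B (Python) =====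
-- def format_roles(content):
--     """Format roles as cards"""
--     # Block-at-a-time two-pointer scan: at each numbered start line, an inner
--     # scan finds the next start; that slice (blank lines removed) is one block.
--     lines = content.split('\n')
--     n = len(lines)
--     blocks = []
--     i = 0
--     while i < n:
--         if _is_start(lines[i]):
--             j = i + 1
--             while j < n and not _is_start(lines[j]):
--                 j += 1
--             blocks.append([lines[i]] + [l for l in lines[i + 1:j] if l.strip()])
--             i = j
--         else:
--             i += 1
--     return '\n'.join(_card(b) for b in blocks)
--
--
-- def _is_start(line):
--     return line.strip()[:2] in ('1.', '2.', '3.')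
--
--
-- def _title_info(title):
--     """Extract (role_name, match_score) from a stripped title line."""
--     name = ""
--     score = ""
--     if "**" in title:
--         parts = title.split("**")
--         if len(parts) > 1:
--             name = parts[1].strip()
--             if "(Match Score:" in title:
--                 mp = title.split("(Match Score:")
--                 if len(mp) > 1:
--                     score = mp[1].split(")")[0].strip()
--     return name, score
--
--
-- def _detail_div(line):
--     """Render one detail line; empty string for non-detail lines."""
--     line = line.strip()
--     if not line.startswith('-'):
--         return ""
--     detail = line[1:].strip()
--     for label in ("Salary Range:", "Key Requirements:", "Why It Fits:"):
--         if label in detail: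
--             return f'<div class="role-detail"><strong>{label}</strong> {detail.split(label)[1].strip()}</div>'
--     return f'<div class="role-detail">{detail}</div>'
--
--
-- def _card(lines):
--     name, score = _title_info(lines[0].strip())
--     parts = [f'''
--     <div class="role-card">
--         <div class="role-title">{name} (Match Score: {score})</div>
--     ''']
--     parts += [_detail_div(l) for l in lines[1:]]
--     parts.append('</div>')
--     return ''.join(parts)
-- ===== Notes on version B (the rewrite author's own statement) =====
-- stated objective: alternative
-- what changed: Replaces A's line-at-a-time flag machine (in_role flag, mutable current block, trailing flush) with a block-at-a-time two-pointer index scan: at each numbered start line an inner scan finds the next start, the slice between them is blank-filtered into a block in one step, and the outer index jumps past it; cards are rendered by joining a list of parts instead of string +=.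
import Mathlib
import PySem

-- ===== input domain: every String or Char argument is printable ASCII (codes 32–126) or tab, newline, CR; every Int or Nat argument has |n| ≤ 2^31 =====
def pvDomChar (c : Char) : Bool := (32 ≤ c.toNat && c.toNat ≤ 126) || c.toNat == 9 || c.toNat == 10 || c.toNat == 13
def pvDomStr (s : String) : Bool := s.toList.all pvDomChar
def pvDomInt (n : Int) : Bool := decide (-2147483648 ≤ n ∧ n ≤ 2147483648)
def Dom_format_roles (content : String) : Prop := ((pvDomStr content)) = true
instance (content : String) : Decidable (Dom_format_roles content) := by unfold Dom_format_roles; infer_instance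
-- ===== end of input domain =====

-- B replaces A's flag-driven line-at-a-time loop by a block-at-a-time two-pointer scan:
-- at each numbered start line an inner scan finds the next start and that slice,
-- blank-filtered, becomes one block (alternative decomposition, same cost).

-- ===== PORT A =====
-- helper format_role_card: transliteration of A's helper; role_lines is never [] at its
-- call sites, so the .getD "" after role_lines[0] is unreachable.
def pvCardA (role_lines : List String) : String :=
  let role_title := PySem.Str.strip ((PySem.List.pyGet? role_lines 0).getD "")
  let ns : String × String :=
    if PySem.Str.isIn "**" role_title then
      let parts := (PySem.Str.split? role_title "**").getD []
      if parts.length > 1 then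
        let role_name := PySem.Str.strip ((PySem.List.pyGet? parts 1).getD "")
        if PySem.Str.isIn "(Match Score:" role_title then
          let match_parts := (PySem.Str.split? role_title "(Match Score:").getD []
          if match_parts.length > 1 then
            (role_name,
             PySem.Str.strip ((PySem.List.pyGet?
               ((PySem.Str.split? ((PySem.List.pyGet? match_parts 1).getD "") ")").getD []) 0).getD ""))
          else (role_name, "")
        else (role_name, "")
      else ("", "")
    else ("", "")
  let card0 := "\n    <div class=\"role-card\">\n        <div class=\"role-title\">" ++ ns.1
      ++ " (Match Score: " ++ ns.2 ++ ")</div>\n    "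
  let body := (PySem.List.slice role_lines (some 1) none).foldl (fun acc line0 =>
    let line := PySem.Str.strip line0
    if PySem.Str.startswith line "-" then
      let detail := PySem.Str.strip (PySem.Str.slice line (some 1) none)
      if PySem.Str.isIn "Salary Range:" detail then
        acc ++ "<div class=\"role-detail\"><strong>Salary Range:</strong> "
            ++ PySem.Str.strip ((PySem.List.pyGet? ((PySem.Str.split? detail "Salary Range:").getD []) 1).getD "") ++ "</div>"
      else if PySem.Str.isIn "Key Requirements:" detail then
        acc ++ "<div class=\"role-detail\"><strong>Key Requirements:</strong> "
            ++ PySem.Str.strip ((PySem.List.pyGet? ((PySem.Str.split? detail "Key Requirements:").getD []) 1).getD "") ++ "</div>"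
      else if PySem.Str.isIn "Why It Fits:" detail then
        acc ++ "<div class=\"role-detail\"><strong>Why It Fits:</strong> "
            ++ PySem.Str.strip ((PySem.List.pyGet? ((PySem.Str.split? detail "Why It Fits:").getD []) 1).getD "") ++ "</div>"
      else
        acc ++ "<div class=\"role-detail\">" ++ detail ++ "</div>"
    else acc) card0
  body ++ "</div>"

-- the body of A's 'for line in content.split(...)' loop, named for the proofs
def pvStepA (st : List String × List String × Bool) (line : String) :
    List String × List String × Bool :=
  if PySem.Str.startswith (PySem.Str.strip line) "1."
      || PySem.Str.startswith (PySem.Str.strip line) "2."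
      || PySem.Str.startswith (PySem.Str.strip line) "3." then
    ((if st.2.2 then st.1 ++ [pvCardA st.2.1] else st.1), [line], true)
  else if st.2.2 && !(PySem.Str.strip line == "") then
    (st.1, st.2.1 ++ [line], st.2.2)
  else st

def format_roles (content : String) : String :=
  let st := ((PySem.Str.split? content "\n").getD []).foldl pvStepA ([], [], false)
  let formatted_content := if st.2.1.isEmpty then st.1 else st.1 ++ [pvCardA st.2.1]
  PySem.Str.join "\n" formatted_content

-- ===== PORT B =====
def pvIsStart (line : String) : Bool :=
  let s2 := PySem.Str.slice (PySem.Str.strip line) none (some 2)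
  s2 == "1." || s2 == "2." || s2 == "3."

def pvTitleInfo (title : String) : String × String :=
  if PySem.Str.isIn "**" title then
    let parts := (PySem.Str.split? title "**").getD []
    if parts.length > 1 then
      let name := PySem.Str.strip ((PySem.List.pyGet? parts 1).getD "")
      if PySem.Str.isIn "(Match Score:" title then
        let mp := (PySem.Str.split? title "(Match Score:").getD []
        if mp.length > 1 then
          (name,
           PySem.Str.strip ((PySem.List.pyGet?
             ((PySem.Str.split? ((PySem.List.pyGet? mp 1).getD "") ")").getD []) 0).getD ""))
        else (name, "")
      else (name, "")
    else ("", "")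
  else ("", "")

def pvDetailDiv (line0 : String) : String :=
  let line := PySem.Str.strip line0
  if !(PySem.Str.startswith line "-") then ""
  else
    let detail := PySem.Str.strip (PySem.Str.slice line (some 1) none)
    match ["Salary Range:", "Key Requirements:", "Why It Fits:"].find?
        (fun lab => PySem.Str.isIn lab detail) with
    | some lab =>
        "<div class=\"role-detail\"><strong>" ++ lab ++ "</strong> "
          ++ PySem.Str.strip ((PySem.List.pyGet? ((PySem.Str.split? detail lab).getD []) 1).getD "") ++ "</div>"
    | none => "<div class=\"role-detail\">" ++ detail ++ "</div>"

-- lines is never [] at call sites, so the .getD "" after lines[0] is unreachable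
def pvCardB (lines : List String) : String :=
  let ns := pvTitleInfo (PySem.Str.strip ((PySem.List.pyGet? lines 0).getD ""))
  PySem.Str.join ""
    (("\n    <div class=\"role-card\">\n        <div class=\"role-title\">" ++ ns.1
        ++ " (Match Score: " ++ ns.2 ++ ")</div>\n    ")
      :: (PySem.List.slice lines (some 1) none).map pvDetailDiv ++ ["</div>"])

-- B's outer while over the index i, as recursion on the suffix lines[i:];
-- the inner 'while j' scan is the takeWhile, and lines[i+1:j] / the jump 'i = j'
-- are the takeWhile prefix / the drop past it.
def pvParse : List String → List (List String)
  | [] => []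
  | l :: ls =>
    if pvIsStart l then
      let body := ls.takeWhile (fun x => !pvIsStart x)
      (l :: body.filter (fun x => !(PySem.Str.strip x == ""))) :: pvParse (ls.drop body.length)
    else pvParse ls
termination_by ls => ls.length
decreasing_by
  · simp only [List.length_drop, List.length_cons]; omega
  · simp

def format_roles_alt (content : String) : String :=
  let lines := (PySem.Str.split? content "\n").getD []
  PySem.Str.join "\n" ((pvParse lines).map pvCardB)

-- ===== PRECONDITION & SPEC =====
def Spec_format_roles (content : String) (out : String) : Prop := out = format_roles_alt content
instance (content : String) (out : String) : Decidable (Spec_format_roles content out) := by unfold Spec_format_roles; infer_instance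

-- ===== CLAIM =====
def Claim_equal_format_roles : Prop := ∀ (content : String), Dom_format_roles content → Spec_format_roles content (format_roles content)

-- ===== LEMMAS AND PROOFS =====
-- A's final flush, named for the proofs
def pvFinishA (st : List String × List String × Bool) : List String :=
  if st.2.1.isEmpty then st.1 else st.1 ++ [pvCardA st.2.1]

set_option maxHeartbeats 1000000 in
lemma pvStepCard (acc line0 : String) :
    (let line := PySem.Str.strip line0
    if PySem.Str.startswith line "-" then
      let detail := PySem.Str.strip (PySem.Str.slice line (some 1) none)
      if PySem.Str.isIn "Salary Range:" detail then
        acc ++ "<div class=\"role-detail\"><strong>Salary Range:</strong> "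
            ++ PySem.Str.strip ((PySem.List.pyGet? ((PySem.Str.split? detail "Salary Range:").getD []) 1).getD "") ++ "</div>"
      else if PySem.Str.isIn "Key Requirements:" detail then
        acc ++ "<div class=\"role-detail\"><strong>Key Requirements:</strong> "
            ++ PySem.Str.strip ((PySem.List.pyGet? ((PySem.Str.split? detail "Key Requirements:").getD []) 1).getD "") ++ "</div>"
      else if PySem.Str.isIn "Why It Fits:" detail then
        acc ++ "<div class=\"role-detail\"><strong>Why It Fits:</strong> "
            ++ PySem.Str.strip ((PySem.List.pyGet? ((PySem.Str.split? detail "Why It Fits:").getD []) 1).getD "") ++ "</div>"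
      else
        acc ++ "<div class=\"role-detail\">" ++ detail ++ "</div>"
    else acc) = acc ++ pvDetailDiv line0 := by
  unfold pvDetailDiv
  dsimp only
  set D := PySem.Str.strip (PySem.Str.slice (PySem.Str.strip line0) (some 1) none) with hD
  by_cases hs : PySem.Str.startswith (PySem.Str.strip line0) "-"
  · by_cases h1 : PySem.Str.isIn "Salary Range:" D
    · simp only [hs, h1, Bool.not_true, Bool.false_eq_true, if_false, if_true, List.find?_cons_of_pos]
      rw [show "<div class=\"role-detail\"><strong>" ++ "Salary Range:" ++ "</strong> "
        = "<div class=\"role-detail\"><strong>Salary Range:</strong> " from by decide]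
      simp only [String.append_assoc]
    · by_cases h2 : PySem.Str.isIn "Key Requirements:" D
      · have hf : List.find? (fun lab => PySem.Str.isIn lab D)
            ["Salary Range:", "Key Requirements:", "Why It Fits:"] = some "Key Requirements:" := by
          rw [List.find?_cons_of_neg (by simpa using h1), List.find?_cons_of_pos (by simpa using h2)]
        simp only [hs, h1, h2, Bool.not_true, Bool.false_eq_true, if_false, if_true, hf]
        rw [show "<div class=\"role-detail\"><strong>" ++ "Key Requirements:" ++ "</strong> "
          = "<div class=\"role-detail\"><strong>Key Requirements:</strong> " from by decide]
        simp only [String.append_assoc]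
      · by_cases h3 : PySem.Str.isIn "Why It Fits:" D
        · have hf : List.find? (fun lab => PySem.Str.isIn lab D)
              ["Salary Range:", "Key Requirements:", "Why It Fits:"] = some "Why It Fits:" := by
            rw [List.find?_cons_of_neg (by simpa using h1), List.find?_cons_of_neg (by simpa using h2),
              List.find?_cons_of_pos (by simpa using h3)]
          simp only [hs, h1, h2, h3, Bool.not_true, Bool.false_eq_true, if_false, if_true, hf]
          rw [show "<div class=\"role-detail\"><strong>" ++ "Why It Fits:" ++ "</strong> "
            = "<div class=\"role-detail\"><strong>Why It Fits:</strong> " from by decide]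
          simp only [String.append_assoc]
        · have hf : List.find? (fun lab => PySem.Str.isIn lab D)
              ["Salary Range:", "Key Requirements:", "Why It Fits:"] = none := by
            rw [List.find?_cons_of_neg (by simpa using h1), List.find?_cons_of_neg (by simpa using h2),
              List.find?_cons_of_neg (by simpa using h3), List.find?_nil]
          simp only [hs, h1, h2, h3, Bool.not_true, Bool.false_eq_true, if_false, if_true, hf]
          simp only [String.append_assoc]
  · simp only [Bool.not_eq_true] at hs
    simp only [hs, Bool.not_false, Bool.false_eq_true, if_false, if_true, String.append_empty]

lemma pvJoinEmpty_cons (x : String) (xs : List String) :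
    PySem.Str.join "" (x :: xs) = x ++ PySem.Str.join "" xs := by
  apply String.toList_inj.mp
  have h : ∀ (c : List Char) (cs : List (List Char)),
      PySem.Chars.join [] (c :: cs) = c ++ PySem.Chars.join [] cs := by
    intro c cs
    cases cs with
    | nil => simp [PySem.Chars.join_singleton, PySem.Chars.join_nil]
    | cons b t => simp [PySem.Chars.join_cons_cons]
  simpa [PySem.Str.join] using h x.toList (xs.map String.toList)

lemma pvJoinEmpty_append_single (xs : List String) (e : String) :
    PySem.Str.join "" (xs ++ [e]) = PySem.Str.join "" xs ++ e := by
  induction xs with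
  | nil =>
      simp only [List.nil_append]
      rw [pvJoinEmpty_cons]
      apply String.toList_inj.mp
      simp [PySem.Str.join, PySem.Chars.join_nil]
  | cons x t ih =>
      rw [List.cons_append, pvJoinEmpty_cons, ih, pvJoinEmpty_cons, String.append_assoc]

lemma pvFoldlAppend (d : String → String) (ls : List String) (a : String) :
    ls.foldl (fun acc l => acc ++ d l) a = a ++ PySem.Str.join "" (ls.map d) := by
  induction ls generalizing a with
  | nil => simp [PySem.Str.join, PySem.Chars.join_nil]
  | cons x t ih =>
      simp only [List.foldl_cons, List.map_cons, pvJoinEmpty_cons, ih]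
      rw [String.append_assoc]

lemma pvStepFunEq :
    (fun (acc line0 : String) =>
      let line := PySem.Str.strip line0
      if PySem.Str.startswith line "-" then
        let detail := PySem.Str.strip (PySem.Str.slice line (some 1) none)
        if PySem.Str.isIn "Salary Range:" detail then
          acc ++ "<div class=\"role-detail\"><strong>Salary Range:</strong> "
              ++ PySem.Str.strip ((PySem.List.pyGet? ((PySem.Str.split? detail "Salary Range:").getD []) 1).getD "") ++ "</div>"
        else if PySem.Str.isIn "Key Requirements:" detail then
          acc ++ "<div class=\"role-detail\"><strong>Key Requirements:</strong> "
              ++ PySem.Str.strip ((PySem.List.pyGet? ((PySem.Str.split? detail "Key Requirements:").getD []) 1).getD "") ++ "</div>"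
        else if PySem.Str.isIn "Why It Fits:" detail then
          acc ++ "<div class=\"role-detail\"><strong>Why It Fits:</strong> "
              ++ PySem.Str.strip ((PySem.List.pyGet? ((PySem.Str.split? detail "Why It Fits:").getD []) 1).getD "") ++ "</div>"
        else
          acc ++ "<div class=\"role-detail\">" ++ detail ++ "</div>"
      else acc)
    = fun (acc line0 : String) => acc ++ pvDetailDiv line0 := by
  funext acc line0
  exact pvStepCard acc line0

lemma pvCardEq (ls : List String) : pvCardA ls = pvCardB ls := by
  unfold pvCardA pvCardB pvTitleInfo
  rw [pvStepFunEq]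
  dsimp only
  rw [pvFoldlAppend pvDetailDiv]
  conv_rhs => rw [pvJoinEmpty_append_single, pvJoinEmpty_cons]

lemma pvStartswith_two (s p : String) (h : p.toList.length = 2) :
    PySem.Str.startswith s p = (PySem.Str.slice s none (some 2) == p) := by
  rw [Bool.eq_iff_iff, beq_iff_eq, PySem.Str.startswith_eq, PySem.Chars.startswith_iff,
    List.prefix_iff_eq_take, ← String.toList_inj]
  simp [PySem.Str.toList_slice, PySem.List.slice_to, h]
  constructor <;> intro h' <;> exact h'.symm

lemma pvStartEq (s : String) :
    (PySem.Str.startswith (PySem.Str.strip s) "1." || PySem.Str.startswith (PySem.Str.strip s) "2."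
      || PySem.Str.startswith (PySem.Str.strip s) "3.") = pvIsStart s := by
  unfold pvIsStart
  rw [pvStartswith_two _ "1." (by decide), pvStartswith_two _ "2." (by decide),
    pvStartswith_two _ "3." (by decide)]

lemma pvDrop_takeWhile (p : String → Bool) (ls : List String) :
    ls.drop (ls.takeWhile p).length = ls.dropWhile p := by
  induction ls with
  | nil => rfl
  | cons x t ih =>
      by_cases h : p x
      · simp [h, ih]
      · simp [h]

-- A's fold through a run of non-start lines just blank-filters them into the current block
lemma pvBlockRun (pre : List String) (fc cur : List String)
    (hp : ∀ x ∈ pre, pvIsStart x = false) :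
    pre.foldl pvStepA (fc, cur, true)
      = (fc, cur ++ pre.filter (fun x => !(PySem.Str.strip x == "")), true) := by
  induction pre generalizing cur with
  | nil => simp
  | cons x t ih =>
      have hx : pvIsStart x = false := hp x (by simp)
      rw [List.foldl_cons]
      have hstep : pvStepA (fc, cur, true) x
          = (fc, cur ++ List.filter (fun x => !(PySem.Str.strip x == "")) [x], true) := by
        unfold pvStepA
        dsimp only
        rw [pvStartEq, hx, if_neg (by simp)]
        by_cases hb : (PySem.Str.strip x == "") = true
        · simp [hb, List.filter]
        · simp only [Bool.not_eq_true] at hb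
          simp [hb, List.filter]
      rw [hstep, ih _ (fun y hy => hp y (by simp [hy]))]
      simp [List.filter_cons]
      split <;> simp

lemma pvMainTrue (n : Nat) : ∀ (ls : List String), ls.length ≤ n → ∀ (fc cur : List String),
    cur ≠ [] →
    pvFinishA (ls.foldl pvStepA (fc, cur, true))
      = fc ++ (((cur ++ (ls.takeWhile (fun x => !pvIsStart x)).filter
            (fun x => !(PySem.Str.strip x == ""))) ::
          pvParse (ls.drop (ls.takeWhile (fun x => !pvIsStart x)).length)).map pvCardA) := by
  induction n with
  | zero =>
      intro ls hl fc cur hc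
      have : ls = [] := List.eq_nil_of_length_eq_zero (Nat.le_zero.mp hl)
      subst this
      simp [pvFinishA, pvParse, List.isEmpty_iff, hc]
  | succ n ih =>
      intro ls hl fc cur hc
      have hsplit : ls = ls.takeWhile (fun x => !pvIsStart x) ++ ls.dropWhile (fun x => !pvIsStart x) :=
        (List.takeWhile_append_dropWhile).symm
      set pre := ls.takeWhile (fun x => !pvIsStart x) with hpre
      set post := ls.dropWhile (fun x => !pvIsStart x) with hpost
      have hdrop : ls.drop pre.length = post := pvDrop_takeWhile _ ls
      have hprenostart : ∀ x ∈ pre, pvIsStart x = false := by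
        intro x hx
        have := List.mem_takeWhile_imp hx
        simpa using this
      rw [hdrop]
      conv_lhs => rw [hsplit]
      rw [List.foldl_append, pvBlockRun pre fc cur hprenostart]
      cases hpostc : post with
      | nil =>
          simp [pvFinishA, pvParse, List.isEmpty_iff, hc]
      | cons p ps =>
          have hpstart : pvIsStart p = true := by
            have := List.head?_dropWhile_not (fun x => !pvIsStart x) ls
            rw [← hpost, hpostc] at this
            simpa using this
          have hstep : pvStepA (fc, cur ++ pre.filter (fun x => !(PySem.Str.strip x == "")), true) p
              = (fc ++ [pvCardA (cur ++ pre.filter (fun x => !(PySem.Str.strip x == "")))], [p], true) := by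
            unfold pvStepA
            dsimp only
            rw [pvStartEq, hpstart, if_pos rfl]
            simp
          rw [List.foldl_cons, hstep]
          have hlen : ps.length ≤ n := by
            have h1 : post.length ≤ ls.length := by
              rw [hpost]; exact List.length_dropWhile_le _ _
            rw [hpostc] at h1
            simp at h1
            omega
          rw [ih ps hlen _ [p] (by simp)]
          rw [pvParse]
          rw [if_pos hpstart]
          simp only [List.map_cons, List.cons_append, List.append_assoc]
          rfl

lemma pvMainFalse (ls : List String) :
    pvFinishA (ls.foldl pvStepA ([], [], false)) = (pvParse ls).map pvCardA := by
  induction ls with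
  | nil => simp [pvFinishA, pvParse]
  | cons l t ih =>
      rw [List.foldl_cons]
      by_cases hl : pvIsStart l
      · have hstep : pvStepA ([], [], false) l = ([], [l], true) := by
          unfold pvStepA
          dsimp only
          rw [pvStartEq, hl, if_pos rfl]
          simp
        rw [hstep, pvMainTrue t.length t (le_refl _) [] [l] (by simp), pvParse, if_pos hl]
        simp
      · have hstep : pvStepA ([], [], false) l = ([], [], false) := by
          unfold pvStepA
          dsimp only
          rw [pvStartEq]
          simp [hl]
        rw [hstep, ih, pvParse, if_neg hl]

-- ===== VERDICT =====
theorem format_roles_spec : Claim_equal_format_roles := by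
  intro content _
  unfold Spec_format_roles format_roles format_roles_alt
  dsimp only
  have h := pvMainFalse ((PySem.Str.split? content "\n").getD [])
  unfold pvFinishA at h
  rw [h]
  congr 1
  exact List.map_congr_left (fun x _ => pvCardEq x)
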